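-- pv_equiv track=rewrite | github.com/avasileios/Advent-of-Code-Solutions | 2017/Day-21-Challenge/day21p1.py | build_lookup_cache
-- ===== SOURCE A (Python) =====
-- from typing import List, Dict, Tuple, Any
--
-- def rotate_and_flip(pattern: List[str]) -> List[List[str]]:
--     """
--     Generates all 8 possible rotations and flips (transformations) of a square pattern.
--
--     Args:
--         pattern (List[str]): Input pattern (e.g., ['.#.', '..#', '###']).
--
--     Returns:
--         List[List[str]]: A list of 8 unique transformed patterns (each pattern is a list of strings).
--     """
--     size = len(pattern)
--     grid = [list(row) for row in pattern]
--
--     def to_tuple(g):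
--         return tuple("".join(row) for row in g)
--
--     transformed = set()
--     current_grid = grid
--
--     # R0, R90, R180, R270
--     for _ in range(4):
--         # Add current grid (0, 90, 180, 270 degree rotation)
--         transformed.add(to_tuple(current_grid))
--
--         # Add flip (horizontal)
--         flipped_grid = [row[::-1] for row in current_grid]
--         transformed.add(to_tuple(flipped_grid))
--
--         # Rotate 90 degrees clockwise for the next iteration
--         next_grid = [['' for _ in range(size)] for _ in range(size)]
--         for r in range(size):
--             for c in range(size):
--                 next_grid[c][size - 1 - r] = current_grid[r][c]
--         current_grid = next_grid
--
--     return [list("".join(t) for t in p) for p in transformed]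
--
-- def build_lookup_cache(raw_rules: Dict[str, str]) -> Dict[str, str]:
--     """
--     Creates a comprehensive lookup table mapping ALL 8 transformed input patterns
--     to their single output pattern.
--     """
--     lookup_cache = {}
--
--     for input_str, output_str in raw_rules.items():
--         # Convert pattern string ('#./..') to list of strings (['#.', '..'])
--         input_pattern = input_str.split('/')
--
--         # Generate all 8 rotations/flips
--         all_transforms = rotate_and_flip(input_pattern)
--
--         # Map all transformed strings back to the same output
--         for transformed_pattern in all_transforms:
--             # Recreate the pattern string for the lookup key
--             key = "/".join(transformed_pattern)
--             lookup_cache[key] = output_str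
--
--     return lookup_cache
-- ===== SOURCE B (Python) =====
-- from typing import Dict
--
--
-- def build_lookup_cache(raw_rules: Dict[str, str]) -> Dict[str, str]:
--     """Closed-form version: no rotation loop, no grid state, no dedup set.
--
--     Each of the eight symmetric variants is read off directly from the input
--     rows by its own coordinate formula; duplicate variants are harmless since
--     re-inserting the same key/value into the dict is a no-op.
--     """
--     cache = {}
--     for input_str, output_str in raw_rules.items():
--         rows = input_str.split('/')
--         n = len(rows)
--         # the six proper grid transforms, each as a closed-form coordinate map
--         maps = [
--             lambda i, j: (n - 1 - j, i),          # rotate 90 cw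
--             lambda i, j: (j, i),                  # its mirror (transpose)
--             lambda i, j: (n - 1 - i, n - 1 - j),  # rotate 180
--             lambda i, j: (n - 1 - i, j),          # its mirror (vertical flip)
--             lambda i, j: (j, n - 1 - i),          # rotate 270 cw
--             lambda i, j: (n - 1 - j, n - 1 - i),  # its mirror (anti-transpose)
--         ]
--         keys = ["/".join(rows), "/".join(r[::-1] for r in rows)]
--         keys += ["/".join("".join(rows[f(i, j)[0]][f(i, j)[1]] for j in range(n))
--                           for i in range(n)) for f in maps]
--         for key in keys:
--             cache[key] = output_str
--     return cache
-- ===== Notes on version B (the rewrite author's own statement) =====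
-- stated objective: simpler
-- what changed: A maintains a mutating current grid that it rotates step by step with nested index loops and dedupes through a set of tuples before inserting; B has no rotation loop, no grid state and no set: each symmetric variant is read straight off the input rows by its own closed-form coordinate formula (a table of six maps plus the pattern and its row-mirror), and duplicate variants are left to the dict's overwrite-in-place semantics.
import Mathlib
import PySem

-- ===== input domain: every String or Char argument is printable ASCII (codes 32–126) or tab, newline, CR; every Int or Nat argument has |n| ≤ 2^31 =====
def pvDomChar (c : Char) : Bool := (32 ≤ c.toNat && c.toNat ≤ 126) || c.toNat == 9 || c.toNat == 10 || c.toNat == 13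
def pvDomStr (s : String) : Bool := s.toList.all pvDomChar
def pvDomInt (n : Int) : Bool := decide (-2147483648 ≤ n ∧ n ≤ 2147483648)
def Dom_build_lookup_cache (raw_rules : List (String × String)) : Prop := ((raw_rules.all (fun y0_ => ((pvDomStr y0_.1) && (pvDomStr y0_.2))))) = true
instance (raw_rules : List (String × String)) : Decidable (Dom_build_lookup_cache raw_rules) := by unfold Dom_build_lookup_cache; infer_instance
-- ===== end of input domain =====

-- B drops A's incremental rotation loop, grid state and dedup set: every
-- symmetric variant is read off the input rows by its own closed-form
-- coordinate map, duplicates being left to the dict's overwrite-in-place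
-- semantics (objective: simpler; same asymptotic cost).

-- ===== PORT A =====
-- Python cells are one-character strings (list(row)); next_grid starts as '' cells.
-- to_tuple: tuple("".join(row) for row in g), a tuple modelled as List String.
def pvToTuple (g : List (List String)) : List String :=
  g.map (fun row => PySem.Str.join "" row)

-- the nested r/c loops filling next_grid[c][size-1-r] = current_grid[r][c];
-- getD is exact for in-range indices (out-of-range reads are Python IndexError,
-- excluded by Pre_); List.set/modify are exact for the always-in-range writes.
def pvRotateIdx (size : Nat) (g : List (List String)) : List (List String) :=
  (List.range size).foldl (fun next r =>
    (List.range size).foldl (fun next c =>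
      next.modify c (fun row => row.set (size - 1 - r) ((g.getD r []).getD c "")))
      next)
    ((List.range size).map (fun _ => (List.range size).map (fun _ => "")))

def rotate_and_flip (pattern : List String) : List (List String) :=
  let size := pattern.length
  let grid : List (List String) := pattern.map (fun row => row.toList.map (fun c => String.ofList [c]))
  let st := (List.range 4).foldl
    (fun (st : PySem.Set (List String) × List (List String)) _ =>
      let transformed := PySem.Set.add st.1 (pvToTuple st.2)
      let flipped := st.2.map List.reverse       -- row[::-1]
      let transformed := PySem.Set.add transformed (pvToTuple flipped)
      (transformed, pvRotateIdx size st.2))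
    (PySem.Set.empty, grid)
  -- [list("".join(t) for t in p) for p in transformed] ("".join over a string's chars)
  st.1.map (fun p => p.map (fun t => PySem.Str.join "" (t.toList.map (fun c => String.ofList [c]))))

def build_lookup_cache (raw_rules : List (String × String)) : List (String × String) :=
  (raw_rules.foldl (fun (cache : PySem.Dict String String) rule =>
      let input_pattern := (PySem.Str.split? rule.1 "/").getD []   -- sep "/" ≠ "": never none
      let all_transforms := rotate_and_flip input_pattern
      all_transforms.foldl (fun cache tp => cache.insert (PySem.Str.join "/" tp) rule.2) cache)
    PySem.Dict.empty).items

-- ===== PORT B =====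
-- the six lambdas of Source B: closed-form coordinate maps on the n×n grid
def pvMaps (n : Nat) : List (Nat → Nat → Nat × Nat) :=
  [fun i j => (n - 1 - j, i),          -- rotate 90 cw
   fun i j => (j, i),                  -- its mirror (transpose)
   fun i j => (n - 1 - i, n - 1 - j),  -- rotate 180
   fun i j => (n - 1 - i, j),          -- its mirror (vertical flip)
   fun i j => (j, n - 1 - i),          -- rotate 270 cw
   fun i j => (n - 1 - j, n - 1 - i)]  -- its mirror (anti-transpose)

-- "/".join("".join(rows[f(i,j)[0]][f(i,j)[1]] for j in range(n)) for i in range(n));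
-- rows[a][b] is in range under Pre_ (Python raises IndexError otherwise), so getD is exact.
def pvVariantRows (rows : List String) (n : Nat) (f : Nat → Nat → Nat × Nat) : List String :=
  (List.range n).map (fun i =>
    PySem.Str.join "" ((List.range n).map (fun j =>
      String.ofList [((rows.getD (f i j).1 "").toList.getD (f i j).2 ' ')])))

def pvKeys (rows : List String) (n : Nat) : List String :=
  [PySem.Str.join "/" rows,
   PySem.Str.join "/" (rows.map (fun r => String.ofList r.toList.reverse))]   -- r[::-1]
  ++ (pvMaps n).map (fun f => PySem.Str.join "/" (pvVariantRows rows n f))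

def build_lookup_cache_alt (raw_rules : List (String × String)) : List (String × String) :=
  (raw_rules.foldl (fun (cache : PySem.Dict String String) rule =>
      let rows := (PySem.Str.split? rule.1 "/").getD []   -- sep "/" ≠ "": never none
      (pvKeys rows rows.length).foldl (fun cache k => cache.insert k rule.2) cache)
    PySem.Dict.empty).items

-- ===== PRECONDITION & SPEC =====
-- Pre_ excludes exactly the inputs on which A raises IndexError: a rule whose
-- pattern has a row shorter than its number of rows.
def Pre_build_lookup_cache (raw_rules : List (String × String)) : Prop :=
  ∀ p ∈ raw_rules, ∀ row ∈ (PySem.Str.split? p.1 "/").getD [],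
    ((PySem.Str.split? p.1 "/").getD []).length ≤ row.toList.length
instance (raw_rules : List (String × String)) : Decidable (Pre_build_lookup_cache raw_rules) := by unfold Pre_build_lookup_cache; infer_instance

def pvWitness_build_lookup_cache : (List (String × String)) := [("#./..", "##./#../...")]

def Spec_build_lookup_cache (raw_rules : List (String × String)) (out : List (String × String)) : Prop := out = build_lookup_cache_alt raw_rules
instance (raw_rules : List (String × String)) (out : List (String × String)) : Decidable (Spec_build_lookup_cache raw_rules out) := by unfold Spec_build_lookup_cache; infer_instance

-- ===== CLAIM (what is proved, stated in full; the proofs are below) =====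
def Claim_equal_build_lookup_cache : Prop := ∀ (raw_rules : List (String × String)), Dom_build_lookup_cache raw_rules → Pre_build_lookup_cache raw_rules → Spec_build_lookup_cache raw_rules (build_lookup_cache raw_rules)

-- ===== LEMMAS AND PROOFS =====

-- elementwise form of an n×n grid derived from g by a coordinate map
def pvES (g : List (List String)) (n : Nat) (f : Nat → Nat → Nat × Nat) : List (List String) :=
  (List.range n).map (fun i => (List.range n).map (fun j =>
    (g.getD (f i j).1 []).getD (f i j).2 ""))

-- the common elementwise description of a clockwise quarter-turn of the n×n block
def pvRotSpec (n : Nat) (g : List (List String)) : List (List String) :=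
  pvES g n (fun i j => (n - 1 - j, i))

lemma modify_map_range {α : Type} (n i : Nat) (h : Nat → α) (f : α → α) :
    ((List.range n).map h).modify i f = (List.range n).map (fun j => if j = i then f (h j) else h j) := by
  apply List.ext_getElem?
  intro k
  rw [List.getElem?_modify]
  by_cases hk : k < n
  · simp [hk, eq_comm]
  · simp [hk]

lemma set_map_range {α : Type} (n i : Nat) (h : Nat → α) (v : α) (hi : i < n) :
    ((List.range n).map h).set i v = (List.range n).map (fun j => if j = i then v else h j) := by
  apply List.ext_getElem?
  intro k
  rw [List.getElem?_set]
  by_cases hk : k < n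
  · by_cases hik : i = k <;> simp [hk, hik, eq_comm]
  · have hik : ¬ i = k := by omega
    simp [hk, hik]

lemma innerMap (n j : Nat) (f : Nat → String) :
    ∀ (m : Nat), m ≤ n → ∀ (rowf : Nat → List String),
    (List.range m).foldl (fun nx c => nx.modify c (fun row => row.set j (f c)))
        ((List.range n).map rowf)
    = (List.range n).map (fun c => if c < m then (rowf c).set j (f c) else rowf c) := by
  intro m
  induction m with
  | zero =>
    intro _ rowf
    refine (List.map_congr_left ?_).symm
    intro c _
    simp
  | succ m ih =>
    intro hm rowf
    rw [List.range_succ, List.foldl_append, ih (by omega), List.foldl_cons, List.foldl_nil,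
        modify_map_range]
    refine List.map_congr_left ?_
    intro c hc
    rw [List.mem_range] at hc
    by_cases h1 : c = m
    · subst h1
      simp
    · by_cases h2 : c < m
      · simp [h1, h2, Nat.lt_succ_of_lt h2]
      · have h3 : ¬ c < m + 1 := by omega
        simp [h1, h2, h3]

lemma outerFold (n : Nat) (g : List (List String)) :
    ∀ (k : Nat), k ≤ n →
    (List.range k).foldl (fun next r =>
      (List.range n).foldl (fun next c =>
        next.modify c (fun row => row.set (n - 1 - r) ((g.getD r []).getD c "")))
        next)
      ((List.range n).map (fun _ => (List.range n).map (fun _ => "")))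
    = (List.range n).map (fun c => (List.range n).map (fun j =>
        if n - k ≤ j then (g.getD (n - 1 - j) []).getD c "" else "")) := by
  intro k
  induction k with
  | zero =>
    intro _
    simp only [List.range_zero, List.foldl_nil]
    refine List.map_congr_left ?_
    intro c _
    refine List.map_congr_left ?_
    intro j hj
    rw [List.mem_range] at hj
    rw [if_neg (by omega)]
  | succ k ih =>
    intro hk
    rw [List.range_succ, List.foldl_append, ih (by omega), List.foldl_cons, List.foldl_nil,
        innerMap n (n - 1 - k) (fun c => (g.getD k []).getD c "") n (Nat.le_refl n)]
    refine List.map_congr_left ?_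
    intro c hc
    rw [List.mem_range] at hc
    rw [if_pos hc, set_map_range n (n - 1 - k) _ _ (by omega)]
    refine List.map_congr_left ?_
    intro j hj
    rw [List.mem_range] at hj
    by_cases h1 : j = n - 1 - k
    · rw [if_pos h1, if_pos (by omega)]
      have h4 : n - 1 - (n - 1 - k) = k := by omega
      rw [h1, h4]
    · rw [if_neg h1]
      by_cases h2 : n - k ≤ j
      · rw [if_pos h2, if_pos (by omega)]
      · rw [if_neg h2, if_neg (by omega)]

lemma pvRotateIdx_eq_spec (n : Nat) (g : List (List String)) :
    pvRotateIdx n g = pvRotSpec n g := by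
  rw [pvRotateIdx, outerFold n g n (Nat.le_refl n), pvRotSpec, pvES]
  refine List.map_congr_left ?_
  intro c _
  refine List.map_congr_left ?_
  intro j _
  rw [if_pos (by omega)]

lemma getD_range_map {α : Type} (n i : Nat) (h : Nat → α) (d : α) (hi : i < n) :
    ((List.range n).map h).getD i d = h i := by
  rw [List.getD_eq_getElem _ _ (by simpa using hi)]
  simp

lemma rotSpec_of_es (g : List (List String)) (n : Nat) (f : Nat → Nat → Nat × Nat) :
    pvRotSpec n (pvES g n f) = pvES g n (fun i j => f (n - 1 - j) i) := by
  rw [pvRotSpec]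
  unfold pvES
  refine List.map_congr_left ?_
  intro i hi
  rw [List.mem_range] at hi
  refine List.map_congr_left ?_
  intro j hj
  rw [List.mem_range] at hj
  rw [getD_range_map n (n - 1 - j) _ [] (by omega), getD_range_map n i _ "" hi]

lemma rev_range_map {α : Type} (n : Nat) (h : Nat → α) :
    ((List.range n).map h).reverse = (List.range n).map (fun j => h (n - 1 - j)) := by
  apply List.ext_getElem?
  intro k
  by_cases hk : k < n
  · rw [List.getElem?_reverse (by simpa using hk)]
    have h1 : n - 1 - k < n := by omega
    simp [hk, h1]
  · rw [List.getElem?_eq_none (by simp; omega), List.getElem?_eq_none (by simp; omega)]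

lemma mirror_es (g : List (List String)) (n : Nat) (f : Nat → Nat → Nat × Nat) :
    (pvES g n f).map List.reverse = pvES g n (fun i j => f i (n - 1 - j)) := by
  unfold pvES
  rw [List.map_map]
  refine List.map_congr_left ?_
  intro i _
  simp only [Function.comp_apply]
  rw [rev_range_map]

lemma pvJoinSingletons (cs : List Char) :
    PySem.Str.join "" (cs.map (fun c => String.ofList [c])) = String.ofList cs := by
  apply String.toList_inj.mp
  simp [PySem.Str.toList_join, List.map_map, Function.comp_def, PySem.Chars.join_nil_singletons]

lemma pvRejoin (t : String) :
    PySem.Str.join "" (t.toList.map (fun c => String.ofList [c])) = t := by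
  rw [pvJoinSingletons]
  simp

-- ===== the dict-fold facts: inserting a key that already holds v is a no-op =====

lemma insert_noop (d : PySem.Dict String String) (k v : String)
    (hnd : d.keys.Nodup) (h : d.get? k = some v) : d.insert k v = d := by
  apply PySem.Dict.ext
  have hcont : d.contains k = true := by
    rw [PySem.Dict.contains_eq_isSome_get?, h]; rfl
  rw [PySem.Dict.items_insert_of_contains d v hcont]
  conv_rhs => rw [← List.map_id' d.items]
  refine List.map_congr_left ?_
  intro p hp
  by_cases hpk : p.1 == k
  · have hk : p.1 = k := by simpa using hpk
    have := PySem.Dict.get?_of_mem_items (d := d) (k := p.1) (v := p.2) (by simpa using hp) hnd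
    rw [hk, h] at this
    simp only [hpk, if_pos]
    cases p
    simp_all
  · simp [hpk]

lemma get?_foldIns_pres {α : Type} (f : α → String) (v : String) (k : String) :
    ∀ (L : List α) (d : PySem.Dict String String), d.get? k = some v →
    (L.foldl (fun d t => d.insert (f t) v) d).get? k = some v := by
  intro L
  induction L with
  | nil => intro d h; exact h
  | cons x L ih =>
    intro d h
    refine ih _ ?_
    by_cases hk : k = f x
    · subst hk; exact PySem.Dict.get?_insert_self _ _ _
    · rw [PySem.Dict.get?_insert_of_ne _ _ hk]; exact h

lemma get?_foldIns_mem {α : Type} (f : α → String) (v : String) :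
    ∀ (L : List α) (d : PySem.Dict String String) (t : α), t ∈ L →
    (L.foldl (fun d t => d.insert (f t) v) d).get? (f t) = some v := by
  intro L
  induction L with
  | nil => intro d t ht; cases ht
  | cons x L ih =>
    intro d t ht
    rcases List.mem_cons.mp ht with h | h
    · subst h
      exact get?_foldIns_pres f v (f t) L _ (PySem.Dict.get?_insert_self _ _ _)
    · exact ih _ t h

-- folding inserts over the dedup-as-built set list equals folding over the raw list
lemma foldIns_set_fold {α : Type} [BEq α] [LawfulBEq α] (f : α → String) (v : String) :
    ∀ (Ts s : List α) (d : PySem.Dict String String), d.keys.Nodup →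
    ((Ts.foldl PySem.Set.add s).foldl (fun d t => d.insert (f t) v) d)
    = Ts.foldl (fun d t => d.insert (f t) v) (s.foldl (fun d t => d.insert (f t) v) d) := by
  intro Ts
  induction Ts with
  | nil => intro s d _; rfl
  | cons t Ts ih =>
    intro s d hnd
    rw [List.foldl_cons, List.foldl_cons, ih _ _ hnd]
    congr 1
    rw [PySem.Set.add_eq_ite]
    by_cases hm : t ∈ s
    · rw [if_pos hm]
      refine (insert_noop _ _ _ ?_ ?_).symm
      · exact PySem.Dict.nodup_keys_foldl_insert_key s f (fun _ _ => v) d hnd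
      · exact get?_foldIns_mem f v s d t hm
    · rw [if_neg hm, List.foldl_append, List.foldl_cons, List.foldl_nil]

-- ===== the eight variant keys =====

lemma hab (rows : List String) (n : Nat) (hlen : rows.length = n)
    (hOK : ∀ r ∈ rows, n ≤ r.toList.length) (r c : Nat) (hr : r < n) (hc : c < n) :
    ((rows.map (fun row => row.toList.map (fun ch => String.ofList [ch]))).getD r []).getD c ""
    = String.ofList [((rows.getD r "").toList.getD c ' ')] := by
  have hr' : r < rows.length := by omega
  have hc' : c < rows[r].toList.length := by
    have := hOK rows[r] (List.getElem_mem hr')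
    omega
  have h1 : (rows.map (fun row => row.toList.map (fun ch => String.ofList [ch]))).getD r []
      = rows[r].toList.map (fun ch => String.ofList [ch]) := by
    rw [List.getD_eq_getElem _ _ (by simpa using hr')]
    simp
  have h2 : rows.getD r "" = rows[r] := List.getD_eq_getElem _ _ hr'
  have h3 : (rows[r].toList.map (fun ch => String.ofList [ch])).getD c ""
      = String.ofList [rows[r].toList[c]] := by
    rw [List.getD_eq_getElem _ _ (by simpa using hc')]
    simp
  rw [h1, h2, h3, List.getD_eq_getElem _ _ hc']

lemma tuple_es_eq_variant (rows : List String) (n : Nat) (hlen : rows.length = n)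
    (hOK : ∀ r ∈ rows, n ≤ r.toList.length) (fA fB : Nat → Nat → Nat × Nat)
    (hco : ∀ i j, i < n → j < n → fA i j = fB i j ∧ (fB i j).1 < n ∧ (fB i j).2 < n) :
    pvToTuple (pvES (rows.map (fun row => row.toList.map (fun ch => String.ofList [ch]))) n fA)
    = pvVariantRows rows n fB := by
  unfold pvToTuple pvES pvVariantRows
  rw [List.map_map]
  refine List.map_congr_left ?_
  intro i hi
  rw [List.mem_range] at hi
  simp only [Function.comp_apply]
  congr 1
  refine List.map_congr_left ?_
  intro j hj
  rw [List.mem_range] at hj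
  obtain ⟨he, h1, h2⟩ := hco i j hi hj
  rw [he]
  exact hab rows n hlen hOK _ _ h1 h2

-- ===== the per-rule equality =====

set_option maxHeartbeats 2000000 in
lemma perRule (rows : List String)
    (hOK : ∀ r ∈ rows, rows.length ≤ r.toList.length)
    (cache : PySem.Dict String String) (hnd : cache.keys.Nodup) (v : String) :
    (rotate_and_flip rows).foldl (fun c tp => c.insert (PySem.Str.join "/" tp) v) cache
    = (pvKeys rows rows.length).foldl (fun c k => c.insert k v) cache := by
  set n := rows.length with hn
  set g0 : List (List String) := rows.map (fun row => row.toList.map (fun ch => String.ofList [ch])) with hg0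
  -- the four grids A's loop visits, in elementwise closed form
  have e1 : pvRotSpec n g0 = pvES g0 n (fun i j => (n - 1 - j, i)) := rfl
  have e2 : pvRotSpec n (pvES g0 n (fun i j => (n - 1 - j, i)))
      = pvES g0 n (fun i j => (n - 1 - i, n - 1 - j)) := by
    rw [rotSpec_of_es]
  have e3 : pvRotSpec n (pvES g0 n (fun i j => (n - 1 - i, n - 1 - j)))
      = pvES g0 n (fun i j => (n - 1 - (n - 1 - j), n - 1 - i)) := by
    rw [rotSpec_of_es]
  -- the raw set list A builds
  have hSl : rotate_and_flip rows =
      ([pvToTuple g0, pvToTuple (g0.map List.reverse),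
        pvToTuple (pvES g0 n (fun i j => (n - 1 - j, i))),
        pvToTuple ((pvES g0 n (fun i j => (n - 1 - j, i))).map List.reverse),
        pvToTuple (pvES g0 n (fun i j => (n - 1 - i, n - 1 - j))),
        pvToTuple ((pvES g0 n (fun i j => (n - 1 - i, n - 1 - j))).map List.reverse),
        pvToTuple (pvES g0 n (fun i j => (n - 1 - (n - 1 - j), n - 1 - i))),
        pvToTuple ((pvES g0 n (fun i j => (n - 1 - (n - 1 - j), n - 1 - i))).map List.reverse)
       ] : List (List String)).foldl PySem.Set.add PySem.Set.empty := by
    unfold rotate_and_flip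
    simp only [List.range_succ, List.range_zero, List.nil_append, List.cons_append,
      List.foldl_cons, List.foldl_nil, pvRotateIdx_eq_spec, ← hn, ← hg0, e1, e2, e3]
    simp only [pvToTuple, pvRejoin, List.map_id', List.map_map, Function.comp_def]
  rw [hSl, foldIns_set_fold _ _ _ PySem.Set.empty cache hnd]
  -- the eight key strings
  have hOK' : ∀ r ∈ rows, n ≤ r.toList.length := hOK
  have k0 : pvToTuple g0 = rows := by
    simp only [pvToTuple, hg0, List.map_map, Function.comp_def, pvRejoin, List.map_id']
  have k1 : pvToTuple (g0.map List.reverse)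
      = rows.map (fun r => String.ofList r.toList.reverse) := by
    simp only [pvToTuple, hg0, List.map_map, Function.comp_def, ← List.map_reverse,
      pvJoinSingletons]
  have k2 : pvToTuple (pvES g0 n (fun i j => (n - 1 - j, i)))
      = pvVariantRows rows n (fun i j => (n - 1 - j, i)) := by
    refine tuple_es_eq_variant rows n hn.symm hOK' _ _ ?_
    intro i j hi hj
    exact ⟨rfl, show n - 1 - j < n by omega, show i < n from hi⟩
  have k3 : pvToTuple ((pvES g0 n (fun i j => (n - 1 - j, i))).map List.reverse)
      = pvVariantRows rows n (fun i j => (j, i)) := by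
    rw [mirror_es]
    refine tuple_es_eq_variant rows n hn.symm hOK' _ _ ?_
    intro i j hi hj
    refine ⟨?_, show j < n from hj, show i < n from hi⟩
    show (n - 1 - (n - 1 - j), i) = (j, i)
    simp only [Prod.mk.injEq, and_true]
    omega
  have k4 : pvToTuple (pvES g0 n (fun i j => (n - 1 - i, n - 1 - j)))
      = pvVariantRows rows n (fun i j => (n - 1 - i, n - 1 - j)) := by
    refine tuple_es_eq_variant rows n hn.symm hOK' _ _ ?_
    intro i j hi hj
    exact ⟨rfl, show n - 1 - i < n by omega, show n - 1 - j < n by omega⟩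
  have k5 : pvToTuple ((pvES g0 n (fun i j => (n - 1 - i, n - 1 - j))).map List.reverse)
      = pvVariantRows rows n (fun i j => (n - 1 - i, j)) := by
    rw [mirror_es]
    refine tuple_es_eq_variant rows n hn.symm hOK' _ _ ?_
    intro i j hi hj
    refine ⟨?_, show n - 1 - i < n by omega, show j < n from hj⟩
    show (n - 1 - i, n - 1 - (n - 1 - j)) = (n - 1 - i, j)
    simp only [Prod.mk.injEq, true_and]
    omega
  have k6 : pvToTuple (pvES g0 n (fun i j => (n - 1 - (n - 1 - j), n - 1 - i)))
      = pvVariantRows rows n (fun i j => (j, n - 1 - i)) := by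
    refine tuple_es_eq_variant rows n hn.symm hOK' _ _ ?_
    intro i j hi hj
    refine ⟨?_, show j < n from hj, show n - 1 - i < n by omega⟩
    show (n - 1 - (n - 1 - j), n - 1 - i) = (j, n - 1 - i)
    simp only [Prod.mk.injEq, and_true]
    omega
  have k7 : pvToTuple ((pvES g0 n (fun i j => (n - 1 - (n - 1 - j), n - 1 - i))).map List.reverse)
      = pvVariantRows rows n (fun i j => (n - 1 - j, n - 1 - i)) := by
    rw [mirror_es]
    refine tuple_es_eq_variant rows n hn.symm hOK' _ _ ?_
    intro i j hi hj
    refine ⟨?_, show n - 1 - j < n by omega, show n - 1 - i < n by omega⟩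
    show (n - 1 - (n - 1 - (n - 1 - j)), n - 1 - i) = (n - 1 - j, n - 1 - i)
    simp only [Prod.mk.injEq, and_true]
    omega
  have hK : ([pvToTuple g0, pvToTuple (g0.map List.reverse),
        pvToTuple (pvES g0 n (fun i j => (n - 1 - j, i))),
        pvToTuple ((pvES g0 n (fun i j => (n - 1 - j, i))).map List.reverse),
        pvToTuple (pvES g0 n (fun i j => (n - 1 - i, n - 1 - j))),
        pvToTuple ((pvES g0 n (fun i j => (n - 1 - i, n - 1 - j))).map List.reverse),
        pvToTuple (pvES g0 n (fun i j => (n - 1 - (n - 1 - j), n - 1 - i))),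
        pvToTuple ((pvES g0 n (fun i j => (n - 1 - (n - 1 - j), n - 1 - i))).map List.reverse)
       ] : List (List String)).map (PySem.Str.join "/") = pvKeys rows n := by
    simp only [List.map_cons, List.map_nil, k0, k1, k2, k3, k4, k5, k6, k7, pvKeys, pvMaps,
      List.cons_append, List.nil_append]
  rw [← hK, List.foldl_map]
  rfl

-- the top-level fold, with the nodup-keys invariant carried along
set_option maxHeartbeats 2000000 in
lemma mainFold :
    ∀ (rules : List (String × String)) (cache : PySem.Dict String String),
    cache.keys.Nodup →
    (∀ p ∈ rules, ∀ row ∈ (PySem.Str.split? p.1 "/").getD [],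
      ((PySem.Str.split? p.1 "/").getD []).length ≤ row.toList.length) →
    rules.foldl (fun (cache : PySem.Dict String String) rule =>
        (rotate_and_flip ((PySem.Str.split? rule.1 "/").getD [])).foldl
          (fun cache tp => cache.insert (PySem.Str.join "/" tp) rule.2) cache) cache
    = rules.foldl (fun (cache : PySem.Dict String String) rule =>
        (pvKeys ((PySem.Str.split? rule.1 "/").getD [])
            ((PySem.Str.split? rule.1 "/").getD []).length).foldl
          (fun cache k => cache.insert k rule.2) cache) cache := by
  intro rules
  induction rules with
  | nil => intro cache _ _; simp only [List.foldl_nil]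
  | cons r rules ih =>
    intro cache hnd hPre
    have h1 := perRule ((PySem.Str.split? r.1 "/").getD [])
      (hPre r List.mem_cons_self) cache hnd r.2
    simp only [List.foldl_cons]
    rw [h1]
    exact ih _ (PySem.Dict.nodup_keys_foldl_insert
        (pvKeys ((PySem.Str.split? r.1 "/").getD [])
          ((PySem.Str.split? r.1 "/").getD []).length) (fun _ _ => r.2) cache hnd)
      (fun p hp => hPre p (List.mem_cons_of_mem _ hp))

-- ===== VERDICT (by name: the statement is the Claim_ definition above) =====
set_option maxHeartbeats 2000000 in
theorem build_lookup_cache_spec : Claim_equal_build_lookup_cache := by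
  intro raw_rules _hDom hPre
  show build_lookup_cache raw_rules = build_lookup_cache_alt raw_rules
  show (raw_rules.foldl (fun (cache : PySem.Dict String String) rule =>
      (rotate_and_flip ((PySem.Str.split? rule.1 "/").getD [])).foldl
        (fun cache tp => cache.insert (PySem.Str.join "/" tp) rule.2) cache)
    PySem.Dict.empty).items
    = (raw_rules.foldl (fun (cache : PySem.Dict String String) rule =>
      (pvKeys ((PySem.Str.split? rule.1 "/").getD [])
          ((PySem.Str.split? rule.1 "/").getD []).length).foldl
        (fun cache k => cache.insert k rule.2) cache)
    PySem.Dict.empty).items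
  rw [mainFold raw_rules PySem.Dict.empty (by rw [PySem.Dict.keys_empty]; exact List.nodup_nil) hPre]
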